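-- pv_equiv track=rewrite | github.com/siggib007/python | IPCalc.py | ValidMask
-- ===== SOURCE A (Python) =====
-- def ValidateIP(strToCheck):
-- 	Quads = strToCheck.split(".")
-- 	if len(Quads) != 4:
-- 		return False
-- 	# end if
--
-- 	for Q in Quads:
-- 		try:
-- 			iQuad = int(Q)
-- 		except ValueError:
-- 			return False
-- 		# end try
--
-- 		if iQuad > 255 or iQuad < 0:
-- 			return False
-- 		# end if
--
-- 	return True
--
-- def DotDec2Int (strValue):
-- 	strHex = ""
-- 	if ValidateIP(strValue) == False:
-- 		return 0
-- 	# end if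
--
-- 	Quads = strValue.split(".")
-- 	for Q in Quads:
-- 		QuadHex = hex(int(Q))
-- 		strwp = "00"+ QuadHex[2:]
-- 		strHex = strHex + strwp[-2:]
-- 	# next
--
-- 	return int(strHex,16)
--
-- def ValidMask(strToCheck):
-- 	iNumBits=0
-- 	if ValidateIP(strToCheck) == False:
-- 		return 0
-- 	# end if
--
-- 	iDecValue = DotDec2Int(strToCheck)
-- 	strBinary = bin(iDecValue)
--
-- 	strTemp = "0"*32 + strBinary[2:]
-- 	strBinary = strTemp[-32:]
-- 	cBit = strBinary[0]
-- 	bFound = False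
-- 	x=0
-- 	for c in strBinary:
-- 		x=x+1
-- 		if cBit != c:
-- 			iNumBits = x-1
-- 			if bFound:
-- 				return 0
-- 			else:
-- 				cBit=c
-- 				bFound = True
-- 			# end if
-- 		# end if
-- 	# next
-- 	if iNumBits==0:
-- 		iNumBits = x
-- 	# end if
-- 	return iNumBits
-- ===== SOURCE B (Python) =====
-- def ValidateIP(strToCheck):
-- 	Quads = strToCheck.split(".")
-- 	if len(Quads) != 4:
-- 		return False
-- 	# end if
--
-- 	for Q in Quads:
-- 		try:
-- 			iQuad = int(Q)
-- 		except ValueError: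
-- 			return False
-- 		# end try
--
-- 		if iQuad > 255 or iQuad < 0:
-- 			return False
-- 		# end if
--
-- 	return True
--
-- def DotDec2Int (strValue):
-- 	strHex = ""
-- 	if ValidateIP(strValue) == False:
-- 		return 0
-- 	# end if
--
-- 	Quads = strValue.split(".")
-- 	for Q in Quads:
-- 		QuadHex = hex(int(Q))
-- 		strwp = "00"+ QuadHex[2:]
-- 		strHex = strHex + strwp[-2:]
-- 	# next
--
-- 	return int(strHex,16)
--
-- def ValidMask(strToCheck):
-- 	if ValidateIP(strToCheck) == False:
-- 		return 0
-- 	strBinary = ("0" * 32 + bin(DotDec2Int(strToCheck))[2:])[-32:]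
-- 	first = strBinary[0]
-- 	rest = strBinary.lstrip(first)
-- 	if rest == "":
-- 		return 32
-- 	elif rest == rest[0] * len(rest):
-- 		return 32 - len(rest)
-- 	else:
-- 		return 0
-- ===== Notes on version B (the rewrite author's own statement) =====
-- stated objective: simpler
-- what changed: The per-character state machine (position counter, current-bit register, found flag, early return) is replaced by a declarative run classification: strip the leading run of the first character and answer from whether the remainder is empty (32), one uniform run (32 - its length), or anything else (0).
import Mathlib
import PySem

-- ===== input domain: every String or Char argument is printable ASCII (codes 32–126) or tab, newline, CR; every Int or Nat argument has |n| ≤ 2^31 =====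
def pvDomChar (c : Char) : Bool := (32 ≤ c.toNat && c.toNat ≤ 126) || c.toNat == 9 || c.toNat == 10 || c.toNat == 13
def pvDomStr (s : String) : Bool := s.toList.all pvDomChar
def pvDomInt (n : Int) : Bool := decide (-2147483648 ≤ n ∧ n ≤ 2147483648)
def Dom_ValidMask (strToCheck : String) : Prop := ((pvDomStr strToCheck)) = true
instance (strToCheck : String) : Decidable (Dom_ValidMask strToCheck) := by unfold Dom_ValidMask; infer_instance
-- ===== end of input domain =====

-- B replaces A's per-character state machine over the 32-bit string by stripping the leading
-- run and classifying the remainder (empty / one uniform run / more); objective: simpler.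

-- ===== PORT A =====
-- shared module helpers (used verbatim by both the Python A and the Python B)

-- the for-loop body of ValidateIP: int(Q) with range check, early `return False`
def validQuadsLoop : List String → Bool
  | [] => true
  | Q :: rest =>
    match PySem.Int.ofStr? Q with
    | none => false            -- except ValueError: return False
    | some iQuad => if iQuad > 255 || iQuad < 0 then false else validQuadsLoop rest

def ValidateIP (strToCheck : String) : Bool :=
  let Quads := (PySem.Str.split? strToCheck ".").getD []   -- split? is none only for an empty separator
  if Quads.length ≠ 4 then false
  else validQuadsLoop Quads

-- hand port of hex(n): "0x" + lowercase hex digits, "-0x…" for negatives (exact: Nat.toDigits 16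
-- produces the same lowercase digits with no padding)
def pyHex (n : Int) : String :=
  if n < 0 then "-0x" ++ String.ofList (Nat.toDigits 16 n.natAbs)
  else "0x" ++ String.ofList (Nat.toDigits 16 n.toNat)

def DotDec2Int (strValue : String) : Int :=
  let strHex := ""
  if ValidateIP strValue = false then 0
  else
    let Quads := (PySem.Str.split? strValue ".").getD []
    let strHex := Quads.foldl (fun strHex Q =>
      let QuadHex := pyHex ((PySem.Int.ofStr? Q).getD 0)   -- int(Q); ValueError unreachable: guarded by ValidateIP
      let strwp := "00" ++ PySem.Str.slice QuadHex (some 2) none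
      strHex ++ PySem.Str.slice strwp (some (-2)) none) strHex
    (PySem.Int.ofStrBase? strHex 16).getD 0   -- int(strHex,16); ValueError unreachable: strHex is 8 hex digits

-- the for-loop of ValidMask, state (x, cBit, bFound, iNumBits), with its post-loop fixup
def validMaskLoop : List Char → Int → Char → Bool → Int → Int
  | [], x, _, _, iNumBits => if iNumBits = 0 then x else iNumBits
  | c :: cs, x, cBit, bFound, iNumBits =>
    let x := x + 1
    if cBit ≠ c then
      if bFound then 0
      else validMaskLoop cs x c true (x - 1)
    else validMaskLoop cs x cBit bFound iNumBits

def ValidMask (strToCheck : String) : Int :=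
  if ValidateIP strToCheck = false then 0
  else
    let iDecValue := DotDec2Int strToCheck
    let strBinary := PySem.Int.pyBin iDecValue
    let strTemp := String.ofList (List.replicate 32 '0') ++ PySem.Str.slice strBinary (some 2) none
    let strBinary := PySem.Str.slice strTemp (some (-32)) none
    let cBit := (PySem.Str.pyGet? strBinary 0).getD '0'   -- strBinary[0]; IndexError unreachable: 32 chars
    validMaskLoop strBinary.toList 0 cBit false 0

-- ===== PORT B =====
-- hand port of s.lstrip(chars): drop leading characters occurring in chars (exact)
def lstripArg (s : String) (chars : String) : String :=
  String.ofList (s.toList.dropWhile (fun c => decide (c ∈ chars.toList)))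

-- hand port of s * n for a string (exact: List.pyRepeat on the code points)
def strRepeat (s : String) (n : Int) : String :=
  String.ofList (PySem.List.pyRepeat s.toList n)

def ValidMask_alt (strToCheck : String) : Int :=
  if ValidateIP strToCheck = false then 0
  else
    let strBinary := PySem.Str.slice
      (String.ofList (List.replicate 32 '0') ++ PySem.Str.slice (PySem.Int.pyBin (DotDec2Int strToCheck)) (some 2) none)
      (some (-32)) none
    let first := (PySem.Str.pyGet? strBinary 0).getD '0'   -- strBinary[0]; IndexError unreachable: 32 chars
    let rest := lstripArg strBinary (String.singleton first)
    if rest = "" then 32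
    else if rest = strRepeat (String.singleton ((PySem.Str.pyGet? rest 0).getD '0')) (PySem.Str.len rest)
    then 32 - PySem.Str.len rest
    else 0

-- ===== PRECONDITION & SPEC =====
def Spec_ValidMask (strToCheck : String) (out : Int) : Prop := out = ValidMask_alt strToCheck
instance (strToCheck : String) (out : Int) : Decidable (Spec_ValidMask strToCheck out) := by unfold Spec_ValidMask; infer_instance

-- ===== CLAIM (what is proved, stated in full; the proofs are below) =====
def Claim_equal_ValidMask : Prop := ∀ (strToCheck : String), Dom_ValidMask strToCheck → Spec_ValidMask strToCheck (ValidMask strToCheck)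

-- ===== LEMMAS AND PROOFS =====

-- once a transition has been seen (bFound = true, iNumBits = n ≠ 0), the loop returns n if the
-- rest of the string is one run of cBit, and 0 otherwise
theorem validMaskLoop_true (cs : List Char) (x : Int) (c : Char) (n : Int) (hn : n ≠ 0) :
    validMaskLoop cs x c true n = if cs.dropWhile (· == c) = [] then n else 0 := by
  induction cs generalizing x with
  | nil => simp [validMaskLoop, hn]
  | cons c' cs ih =>
    by_cases h : c = c'
    · subst h
      simpa [validMaskLoop] using ih (x + 1)
    · have hne : (c' == c) = false := by simp [Ne.symm h]
      simp [validMaskLoop, h, hne]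

-- before any transition (bFound = false, iNumBits = 0, 0 < x characters already consumed), the
-- loop's value is determined by the run structure of the remaining characters
theorem validMaskLoop_false (cs : List Char) (x : Int) (hx : 0 < x) (c : Char) :
    validMaskLoop cs x c false 0 =
      (let rest := cs.dropWhile (· == c)
       if rest = [] then x + cs.length
       else if (rest.drop 1).dropWhile (· == rest.headD '0') = [] then
         x + ((cs.length - rest.length : Nat) : Int)
       else 0) := by
  induction cs generalizing x with
  | nil => simp [validMaskLoop]
  | cons c' cs ih =>
    by_cases h : c = c'
    · subst h
      have hstep : validMaskLoop (c :: cs) x c false 0 = validMaskLoop cs (x + 1) c false 0 := by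
        simp [validMaskLoop]
      rw [hstep, ih (x + 1) (by omega)]
      have hdc : List.dropWhile (· == c) (c :: cs) = List.dropWhile (· == c) cs := by
        simp
      simp only [hdc, List.length_cons]
      cases hdw : cs.dropWhile (· == c) with
      | nil => simp only []; simp; ring
      | cons d r =>
        have hlen : r.length + 1 ≤ cs.length := by
          have := List.length_dropWhile_le (· == c) cs
          rw [hdw] at this; simpa using this
        simp only [List.headD_cons, List.drop_succ_cons, List.drop_zero, List.length_cons,
          reduceCtorEq, if_false]
        split_ifs with h2
        · omega
        · rfl
    · have hne : (c' == c) = false := by simp [Ne.symm h]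
      have hstep : validMaskLoop (c' :: cs) x c false 0
          = validMaskLoop cs (x + 1) c' true (x + 1 - 1) := by
        simp [validMaskLoop, h]
      rw [hstep, validMaskLoop_true cs (x + 1) c' (x + 1 - 1) (by omega)]
      have hdc : List.dropWhile (· == c) (c' :: cs) = c' :: cs := by
        simp [hne]
      simp only [hdc, List.headD_cons, List.drop_succ_cons, List.drop_zero, List.length_cons,
        reduceCtorEq, if_false]
      split_ifs with h2
      · omega
      · rfl

-- A's state machine and B's strip-and-classify tail agree on any 32-character string
theorem tail_equiv (t : String) (hlen : t.toList.length = 32) :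
    validMaskLoop t.toList 0 ((PySem.Str.pyGet? t 0).getD '0') false 0 =
      (if lstripArg t (String.singleton ((PySem.Str.pyGet? t 0).getD '0')) = "" then 32
       else if lstripArg t (String.singleton ((PySem.Str.pyGet? t 0).getD '0'))
              = strRepeat
                  (String.singleton
                    ((PySem.Str.pyGet? (lstripArg t (String.singleton ((PySem.Str.pyGet? t 0).getD '0'))) 0).getD '0'))
                  (PySem.Str.len (lstripArg t (String.singleton ((PySem.Str.pyGet? t 0).getD '0'))))
       then 32 - PySem.Str.len (lstripArg t (String.singleton ((PySem.Str.pyGet? t 0).getD '0')))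
       else 0) := by
  obtain ⟨c0, cs', hcs⟩ : ∃ c0 cs', t.toList = c0 :: cs' := by
    cases h : t.toList with
    | nil => rw [h] at hlen; simp at hlen
    | cons a l => exact ⟨a, l, rfl⟩
  have hfirst : (PySem.Str.pyGet? t 0).getD '0' = c0 := by
    rw [PySem.Str.pyGet?_eq, PySem.Chars.pyGet?_eq_listPyGet?, PySem.List.pyGet?_zero, hcs]; rfl
  have hlen' : cs'.length = 31 := by rw [hcs] at hlen; simpa using hlen
  rw [hfirst, hcs]
  have hA : validMaskLoop (c0 :: cs') 0 c0 false 0 = validMaskLoop cs' 1 c0 false 0 := by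
    simp [validMaskLoop]
  rw [hA, validMaskLoop_false cs' 1 (by omega) c0]
  have hrest : (lstripArg t (String.singleton c0)).toList = cs'.dropWhile (· == c0) := by
    unfold lstripArg
    rw [String.toList_ofList, hcs, String.toList_singleton]
    simp [beq_eq_decide]
  cases hdw : cs'.dropWhile (· == c0) with
  | nil =>
    have hempty : lstripArg t (String.singleton c0) = "" := by
      rw [← String.toList_inj, hrest, hdw]; rfl
    rw [hempty]
    simp [hlen']
  | cons d r =>
    have hlenr : r.length + 1 ≤ 31 := by
      have := List.length_dropWhile_le (· == c0) cs'
      rw [hdw, hlen'] at this; simpa using this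
    have hrtl : (lstripArg t (String.singleton c0)).toList = d :: r := by rw [hrest, hdw]
    have hrestne : lstripArg t (String.singleton c0) ≠ "" := by
      intro h
      rw [← String.toList_inj, hrtl] at h; simp at h
    rw [if_neg hrestne]
    have hhd : (PySem.Str.pyGet? (lstripArg t (String.singleton c0)) 0).getD '0' = d := by
      rw [PySem.Str.pyGet?_eq, PySem.Chars.pyGet?_eq_listPyGet?, PySem.List.pyGet?_zero, hrtl]; rfl
    have hlenrest : PySem.Str.len (lstripArg t (String.singleton c0)) = ((r.length + 1 : Nat) : Int) := by
      rw [PySem.Str.len_eq, hrtl]; simp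
    have hrep : (lstripArg t (String.singleton c0)
          = strRepeat (String.singleton d) (PySem.Str.len (lstripArg t (String.singleton c0))))
        ↔ r.dropWhile (· == d) = [] := by
      rw [← String.toList_inj, hrtl, hlenrest]
      unfold strRepeat
      rw [String.toList_ofList, String.toList_singleton, PySem.List.pyRepeat_singleton]
      have htoNat : ((r.length + 1 : Nat) : Int).toNat = r.length + 1 := by omega
      rw [htoNat, List.dropWhile_eq_nil_iff]
      constructor
      · intro h x hx
        have := List.eq_replicate_iff.mp h
        simp [this.2 x (by simp [hx])]
      · intro h
        apply List.eq_replicate_iff.mpr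
        refine ⟨by simp, ?_⟩
        intro b hb
        rcases List.mem_cons.mp hb with h1 | h2
        · exact h1
        · simpa using h b h2
    rw [hhd]
    simp only [List.headD_cons, List.drop_succ_cons, List.drop_zero, List.length_cons,
      reduceCtorEq, if_false]
    by_cases h2 : r.dropWhile (· == d) = []
    · rw [if_pos h2, if_pos (hrep.mpr h2), hlenrest]
      omega
    · rw [if_neg h2, if_neg (fun hc => h2 (hrep.mp hc))]

-- the 32-character window sliced out in both ports
theorem length_strBinary (s : String) :
    (PySem.Str.slice (String.ofList (List.replicate 32 '0') ++
        PySem.Str.slice (PySem.Int.pyBin (DotDec2Int s)) (some 2) none)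
      (some (-32)) none).toList.length = 32 := by
  rw [PySem.Str.toList_slice, PySem.Chars.slice_eq_listSlice,
    PySem.List.slice_from_neg_ofNat _ 32 (by omega), List.length_drop,
    String.toList_append, String.toList_ofList, List.length_append, List.length_replicate]
  omega

-- ===== VERDICT (by name: the statement is the Claim_ definition above) =====
theorem ValidMask_spec : Claim_equal_ValidMask := by
  intro s _hd
  unfold Spec_ValidMask ValidMask ValidMask_alt
  by_cases hv : ValidateIP s = false
  · rw [if_pos hv, if_pos hv]
  · rw [if_neg hv, if_neg hv]
    exact tail_equiv _ (length_strBinary s)
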